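-- pv_equiv track=rewrite | github.com/thaReal/MasterChef | codeforces/round_673/copypaste.py | solve
-- ===== SOURCE A (Python) =====
-- def solve(n, k, a):
-- 	a.sort()
-- 	mn = a[0]
-- 	spells = 0
--
-- 	for i in range(1, n):
-- 		while a[i] + mn <= k:
-- 			a[i] += mn
-- 			spells += 1
--
-- 	if a[0] + a[1] <= k:
-- 		spells += 1
--
-- 	return spells
-- ===== SOURCE B (Python) =====
-- def solve(n, k, a):
--     # Return-value equivalent to A; A additionally sorts/mutates `a` in place, B does not.
--     s = sorted(a)
--     mn = s[0]
--     spells = 0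
--     final1 = s[1]  # value a[1] holds after all casting
--     if mn > 0:
--         for i in range(1, n):
--             spells += max(0, (k - s[i]) // mn)
--         if n >= 2:
--             final1 = s[1] + mn * max(0, (k - s[1]) // mn)
--     if mn + final1 <= k:
--         spells += 1
--     return spells
-- ===== Notes on version B (the rewrite author's own statement) =====
-- stated objective: alternative
-- what changed: B replaces A's inner increment-until-exceeds while loop with a closed-form floor division max(0,(k-s[i])//mn) per element over a sorted copy, evaluating A's trailing a[0]+a[1] check from the closed-form final value of a[1] (A also sorts/mutates the input list in place; B does not); it trades A's mutation-driven loop nest for per-element arithmetic.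
import Mathlib
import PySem

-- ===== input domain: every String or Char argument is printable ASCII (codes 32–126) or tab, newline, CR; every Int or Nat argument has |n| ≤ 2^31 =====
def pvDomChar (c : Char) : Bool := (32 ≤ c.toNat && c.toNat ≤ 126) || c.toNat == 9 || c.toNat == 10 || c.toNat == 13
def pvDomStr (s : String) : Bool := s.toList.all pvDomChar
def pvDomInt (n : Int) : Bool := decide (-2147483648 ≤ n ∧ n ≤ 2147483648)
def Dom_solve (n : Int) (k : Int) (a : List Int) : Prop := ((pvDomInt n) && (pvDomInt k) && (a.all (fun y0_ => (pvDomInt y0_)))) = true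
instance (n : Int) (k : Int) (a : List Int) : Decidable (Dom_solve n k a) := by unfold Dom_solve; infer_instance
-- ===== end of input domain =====

-- B computes each element's spell count by one floor division instead of A's repeated-addition
-- while loop, and evaluates A's trailing a[0]+a[1] check from the closed-form final value of
-- a[1]; equivalence is about the RETURN value only (A sorts and mutates `a` in place, B does not).

-- ===== PORT A =====
-- the inner `while a[i] + mn <= k: a[i] += mn; spells += 1`, with fuel (enough fuel is
-- supplied at the call site; on inputs where the Python loop terminates the fuel is never
-- exhausted, so the port computes exactly the Python's values)
def pumpA (k mn : Int) : Nat → Int → Int → Int × Int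
  | 0, ai, sp => (ai, sp)
  | f + 1, ai, sp => if ai + mn ≤ k then pumpA k mn f (ai + mn) (sp + 1) else (ai, sp)

-- one iteration of A's `for i in range(1, n)` loop; state = (the mutated list, spells)
def stepA (k mn : Int) (st : List Int × Int) (i : Int) : List Int × Int :=
  let ai := PySem.List.pyGetD st.1 i 0
  let p := pumpA k mn ((k - ai).toNat + 1) ai st.2
  (PySem.List.pySetD st.1 i p.1, p.2)

def solve (n : Int) (k : Int) (a : List Int) : Int :=
  let s := PySem.List.sorted a (fun x => x) false
  let mn := PySem.List.pyGetD s 0 0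
  let r := (PySem.List.pyRange 1 n 1).foldl (stepA k mn) (s, 0)
  if PySem.List.pyGetD r.1 0 0 + PySem.List.pyGetD r.1 1 0 ≤ k then r.2 + 1 else r.2

-- ===== PORT B =====
def solve_alt (n : Int) (k : Int) (a : List Int) : Int :=
  let s := PySem.List.sorted a (fun x => x) false
  let mn := PySem.List.pyGetD s 0 0
  let spells :=
    if 0 < mn then
      (PySem.List.pyRange 1 n).foldl
        (fun sp i => sp + max 0 (PySem.Int.floordiv (k - PySem.List.pyGetD s i 0) mn)) 0
    else 0
  let final1 :=
    if 0 < mn then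
      if 2 ≤ n then
        PySem.List.pyGetD s 1 0 + mn * max 0 (PySem.Int.floordiv (k - PySem.List.pyGetD s 1 0) mn)
      else PySem.List.pyGetD s 1 0
    else PySem.List.pyGetD s 1 0
  if mn + final1 ≤ k then spells + 1 else spells

-- ===== PRECONDITION & SPEC =====
-- does some pair of elements at two distinct positions of `a` sum to at most k?
def pairLE (k : Int) : List Int → Bool
  | [] => false
  | x :: t => t.any (fun y => x + y ≤ k) || pairLE k t

-- Pre_ excludes exactly the inputs on which the Python A raises (len(a) < 2 or n > len(a):
-- IndexError) or diverges (min(a) ≤ 0 with some processed element still able to absorb min(a):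
-- the while loop never terminates).
def Pre_solve (n : Int) (k : Int) (a : List Int) : Prop :=
  2 ≤ a.length ∧ n ≤ (a.length : Int) ∧
  ((∀ x ∈ a, 0 < x) ∨ ¬ (2 ≤ n ∧ pairLE k a = true))
instance (n : Int) (k : Int) (a : List Int) : Decidable (Pre_solve n k a) := by
  unfold Pre_solve; infer_instance
def pvWitness_solve : Int × Int × List Int := (2, 5, [1, 2])

def Spec_solve (n : Int) (k : Int) (a : List Int) (out : Int) : Prop :=
  out = solve_alt n k a
instance (n : Int) (k : Int) (a : List Int) (out : Int) : Decidable (Spec_solve n k a out) := by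
  unfold Spec_solve; infer_instance

-- ===== CLAIM (what is proved, stated in full; the proofs are below) =====
def Claim_equal_solve : Prop := ∀ (n : Int) (k : Int) (a : List Int), Dom_solve n k a → Pre_solve n k a → Spec_solve n k a (solve n k a)

-- ===== LEMMAS AND PROOFS =====

theorem pairLE_perm (k : Int) {l l' : List Int} (h : l.Perm l') :
    pairLE k l = pairLE k l' := by
  induction h with
  | nil => rfl
  | cons x h ih => simp [pairLE, ih, h.any_eq]
  | swap x y l =>
    simp only [pairLE, List.any_cons]
    rw [show y + x = x + y by ring]
    ac_rfl
  | trans _ _ ih1 ih2 => exact ih1.trans ih2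

theorem pairLE_sorted (k : Int) : ∀ (t : List Int) (a b : Int),
    (a :: b :: t).Pairwise (· ≤ ·) → (pairLE k (a :: b :: t) = true ↔ a + b ≤ k) := by
  intro t
  induction t with
  | nil =>
    intro a b _
    simp [pairLE]
  | cons c t' ih =>
    intro a b hp
    rw [List.pairwise_cons] at hp
    have hab : a ≤ b := hp.1 b (by simp)
    have hac : a ≤ c := hp.1 c (by simp)
    have hbt := hp.2
    rw [List.pairwise_cons] at hbt
    have hbc : ∀ y ∈ c :: t', b ≤ y := hbt.1
    have ihr := ih b c hp.2
    constructor
    · intro h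
      simp only [pairLE, List.any_eq_true, decide_eq_true_eq, Bool.or_eq_true] at h ihr ⊢
      rcases h with ⟨y, hy, hsum⟩ | h
      · rcases List.mem_cons.mp hy with rfl | hy'
        · omega
        · have := hbc y hy'; omega
      · have := ihr.mp (by simpa [pairLE, List.any_eq_true] using h)
        omega
    · intro h
      simp only [pairLE, List.any_eq_true, decide_eq_true_eq, Bool.or_eq_true]
      exact Or.inl ⟨b, by simp, h⟩


theorem sortedInt_pairwise (a : List Int) :
    (PySem.List.sorted a (fun x => x) false).Pairwise (· ≤ ·) := by
  simpa using PySem.List.sorted_pairwise a (fun x => x)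

theorem pairLE_iff (k : Int) (a : List Int) (hlen : 2 ≤ a.length) :
    (pairLE k a = true) ↔
    PySem.List.pyGetD (PySem.List.sorted a (fun x => x) false) 0 0
      + PySem.List.pyGetD (PySem.List.sorted a (fun x => x) false) 1 0 ≤ k := by
  rw [← pairLE_perm k (PySem.List.sorted_perm a (fun x => x) false)]
  have hp := sortedInt_pairwise a
  have hslen := PySem.List.length_sorted a (fun x => x) false
  revert hp hslen
  generalize PySem.List.sorted a (fun x => x) false = s
  intro hp hslen
  rcases s with _ | ⟨x, _ | ⟨y, t⟩⟩
  · exfalso; simp at hslen; omega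
  · exfalso; simp at hslen; omega
  · rw [pairLE_sorted k t x y hp]
    rw [PySem.List.pyGetD_eq_getElem (x :: y :: t) 0 (i := 0) (by omega) (by simp; omega),
        PySem.List.pyGetD_eq_getElem (x :: y :: t) 0 (i := 1) (by omega) (by simp)]
    simp

theorem allpos_iff (a : List Int) (hlen : 1 ≤ a.length) :
    (∀ x ∈ a, 0 < x) ↔
    0 < PySem.List.pyGetD (PySem.List.sorted a (fun x => x) false) 0 0 := by
  have hp := sortedInt_pairwise a
  have hslen := PySem.List.length_sorted a (fun x => x) false
  have hmem := fun x => PySem.List.mem_sorted a (fun x => x) false x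
  revert hp hslen hmem
  generalize PySem.List.sorted a (fun x => x) false = s
  intro hp hslen hmem
  rw [PySem.List.pyGetD_eq_getElem _ 0 (by omega) (by omega)]
  constructor
  · intro h
    exact h _ ((hmem _).mp (List.getElem_mem (by omega)))
  · intro h x hx
    obtain ⟨i, hi, rfl⟩ := List.mem_iff_getElem.mp ((hmem x).mpr hx)
    rcases Nat.eq_zero_or_pos i with rfl | hipos
    · exact h
    · rw [List.pairwise_iff_getElem] at hp
      have := hp 0 i (by omega) hi (by omega)
      simp only [Int.toNat_zero] at h
      omega
theorem pump_stop (k mn : Int) (f : Nat) (ai sp : Int) (h : ¬ ai + mn ≤ k) :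
    pumpA k mn f ai sp = (ai, sp) := by
  cases f <;> simp [pumpA, h]

theorem pump_closed (k mn : Int) (hmn : 0 < mn) :
    ∀ (f : Nat) (ai sp : Int), k - ai < mn * f →
    pumpA k mn f ai sp = (ai + mn * max 0 (PySem.Int.floordiv (k - ai) mn),
                          sp + max 0 (PySem.Int.floordiv (k - ai) mn)) := by
  intro f
  induction f with
  | zero =>
    intro ai sp hf
    have h0 : PySem.Int.floordiv (k - ai) mn < 1 := by
      rw [PySem.Int.floordiv_lt_iff_lt_mul hmn]; push_cast at hf; nlinarith
    simp [pumpA]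
    constructor <;> omega
  | succ f ih =>
    intro ai sp hf
    by_cases h : ai + mn ≤ k
    · have hub : k - (ai + mn) < mn * f := by push_cast at hf ⊢; nlinarith
      have hrec := ih (ai + mn) (sp + 1) hub
      have hq1 : 1 ≤ PySem.Int.floordiv (k - ai) mn := by
        rw [PySem.Int.le_floordiv_iff_mul_le hmn]; omega
      have hbr := (PySem.Int.floordiv_eq_iff_of_pos (a := k - ai) hmn).mp rfl
      have hstep : PySem.Int.floordiv (k - (ai + mn)) mn = PySem.Int.floordiv (k - ai) mn - 1 := by
        rw [PySem.Int.floordiv_eq_iff_of_pos hmn]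
        constructor <;> nlinarith [hbr.1, hbr.2]
      simp only [pumpA, if_pos h, hrec, hstep]
      have : max 0 (PySem.Int.floordiv (k - ai) mn) = PySem.Int.floordiv (k - ai) mn := by omega
      have : max 0 (PySem.Int.floordiv (k - ai) mn - 1) = PySem.Int.floordiv (k - ai) mn - 1 := by omega
      rw [this, ‹max 0 (PySem.Int.floordiv (k - ai) mn) = _›, Prod.mk.injEq]
      constructor <;> ring
    · have h0 : PySem.Int.floordiv (k - ai) mn < 1 := by
        rw [PySem.Int.floordiv_lt_iff_lt_mul hmn]; omega
      simp [pumpA, h]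
      constructor <;> omega

theorem pump_final (k mn ai : Int) (hmn : 0 < mn) :
    k < ai + mn * max 0 (PySem.Int.floordiv (k - ai) mn) + mn := by
  by_cases h : 0 ≤ PySem.Int.floordiv (k - ai) mn
  · have hbr := (PySem.Int.floordiv_eq_iff_of_pos (a := k - ai) hmn).mp rfl
    have : max 0 (PySem.Int.floordiv (k - ai) mn) = PySem.Int.floordiv (k - ai) mn := by omega
    rw [this]; nlinarith [hbr.2]
  · push Not at h
    have hneg : ¬ (0 ≤ k - ai) := by
      intro hc
      have h0le : (0:Int) ≤ PySem.Int.floordiv (k - ai) mn :=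
        (PySem.Int.le_floordiv_iff_mul_le (a := k - ai) (q := 0) hmn).mpr (by simpa using hc)
      omega
    have hm : max 0 (PySem.Int.floordiv (k - ai) mn) = 0 := by omega
    rw [hm]; omega

theorem foldl_add_zero (L : List Int) (sp : Int) :
    L.foldl (fun acc (_ : Int) => acc + 0) sp = sp := by
  induction L generalizing sp <;> simp_all

theorem outerA_aux (k mn n : Int) (s : List Int) (t : Int → Int)
    (Hp : ∀ m : Int, 1 ≤ m → m < n → ∀ sp : Int,
      pumpA k mn ((k - PySem.List.pyGetD s m 0).toNat + 1) (PySem.List.pyGetD s m 0) sp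
        = (PySem.List.pyGetD s m 0 + mn * t (PySem.List.pyGetD s m 0),
           sp + t (PySem.List.pyGetD s m 0))) :
    ∀ (F : Nat) (j : Int) (c : List Int) (sp : Int), (n - j).toNat ≤ F → 1 ≤ j →
    n ≤ (s.length : Int) → c.length = s.length →
    (∀ m : Int, j ≤ m → m < n → PySem.List.pyGetD c m 0 = PySem.List.pyGetD s m 0) →
    ((PySem.List.pyRange j n 1).foldl (stepA k mn) (c, sp)).1.length = c.length ∧
    (∀ m : Int, 0 ≤ m → m < j →
      PySem.List.pyGetD ((PySem.List.pyRange j n 1).foldl (stepA k mn) (c, sp)).1 m 0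
        = PySem.List.pyGetD c m 0) ∧
    ((PySem.List.pyRange j n 1).foldl (stepA k mn) (c, sp)).2
      = (PySem.List.pyRange j n 1).foldl
          (fun acc i => acc + t (PySem.List.pyGetD s i 0)) sp := by
  intro F
  induction F with
  | zero =>
    intro j c sp hF hj hn hlen hagree
    have hnj : n ≤ j := by omega
    rw [PySem.List.pyRange_one_eq_nil hnj]
    simp
  | succ F ih =>
    intro j c sp hF hj hn hlen hagree
    by_cases hnj : n ≤ j
    · rw [PySem.List.pyRange_one_eq_nil hnj]; simp
    · push Not at hnj
      rw [PySem.List.pyRange_one_cons hnj]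
      have hjlen : j < (c.length : Int) := by omega
      have hstep : stepA k mn (c, sp) j
          = (PySem.List.pySetD c j (PySem.List.pyGetD s j 0 + mn * t (PySem.List.pyGetD s j 0)),
             sp + t (PySem.List.pyGetD s j 0)) := by
        show (PySem.List.pySetD c j _, _) = _
        rw [hagree j (le_refl j) hnj, Hp j hj hnj sp]
      simp only [List.foldl_cons, hstep]
      set v := PySem.List.pyGetD s j 0 + mn * t (PySem.List.pyGetD s j 0) with hv
      set c' := PySem.List.pySetD c j v with hc'
      have hlen' : c'.length = c.length := PySem.List.length_pySetD c j v
      have hget' : ∀ m : Int, 0 ≤ m → m < n → m ≠ j →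
          PySem.List.pyGetD c' m 0 = PySem.List.pyGetD c m 0 := by
        intro m hm0 hmn' hmj
        rw [hc', PySem.List.pySetD_of_nonneg c v (by omega),
          PySem.List.pyGetD_eq_getElem _ 0 hm0 (by simp [hlen]; omega),
          PySem.List.pyGetD_eq_getElem _ 0 hm0 (by omega)]
        · rw [List.getElem_set]
          have : ¬ (j.toNat = m.toNat) := by omega
          simp [this]
      have hres := ih (j + 1) c' (sp + t (PySem.List.pyGetD s j 0)) (by omega) (by omega) hn
        (by rw [hlen']; exact hlen)
        (by intro m hm1 hm2
            rw [hget' m (by omega) hm2 (by omega)]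
            exact hagree m (by omega) hm2)
      refine ⟨by rw [hres.1, hlen'], ?_, hres.2.2⟩
      intro m hm0 hmj
      rw [hres.2.1 m hm0 (by omega), hget' m hm0 (by omega) (by omega)]

theorem mainfold (k mn n : Int) (s : List Int) (t : Int → Int)
    (h2n : 2 ≤ n) (hn : n ≤ (s.length : Int))
    (Hp : ∀ m : Int, 1 ≤ m → m < n → ∀ sp : Int,
      pumpA k mn ((k - PySem.List.pyGetD s m 0).toNat + 1) (PySem.List.pyGetD s m 0) sp
        = (PySem.List.pyGetD s m 0 + mn * t (PySem.List.pyGetD s m 0),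
           sp + t (PySem.List.pyGetD s m 0))) :
    PySem.List.pyGetD ((PySem.List.pyRange 1 n).foldl (stepA k mn) (s, 0)).1 0 0
      = PySem.List.pyGetD s 0 0 ∧
    PySem.List.pyGetD ((PySem.List.pyRange 1 n).foldl (stepA k mn) (s, 0)).1 1 0
      = PySem.List.pyGetD s 1 0 + mn * t (PySem.List.pyGetD s 1 0) ∧
    ((PySem.List.pyRange 1 n).foldl (stepA k mn) (s, 0)).2
      = (PySem.List.pyRange 1 n).foldl
          (fun acc i => acc + t (PySem.List.pyGetD s i 0)) 0 := by
  rw [PySem.List.pyRange_one_cons (by omega : (1:Int) < n)]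
  simp only [List.foldl_cons]
  have hstep : stepA k mn (s, 0) 1
      = (PySem.List.pySetD s 1 (PySem.List.pyGetD s 1 0 + mn * t (PySem.List.pyGetD s 1 0)),
         0 + t (PySem.List.pyGetD s 1 0)) := by
    show (PySem.List.pySetD s 1 _, _) = _
    rw [Hp 1 (by omega) (by omega) 0]
  rw [hstep]
  set v := PySem.List.pyGetD s 1 0 + mn * t (PySem.List.pyGetD s 1 0) with hv
  set c := PySem.List.pySetD s 1 v with hc
  have hclen : c.length = s.length := PySem.List.length_pySetD s 1 v
  have hcget : ∀ m : Int, 0 ≤ m → m < (s.length : Int) → m ≠ 1 →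
      PySem.List.pyGetD c m 0 = PySem.List.pyGetD s m 0 := by
    intro m hm0 hmlen hm1
    rw [hc, PySem.List.pySetD_of_nonneg s v (by omega),
      PySem.List.pyGetD_eq_getElem _ 0 hm0 (by simpa using hmlen),
      PySem.List.pyGetD_eq_getElem _ 0 hm0 (by omega)]
    · rw [List.getElem_set]
      have : ¬ (1 = m.toNat) := by omega
      simp [this]
  have hcv : PySem.List.pyGetD c 1 0 = v := by
    rw [hc, PySem.List.pySetD_of_nonneg s v (by omega),
      PySem.List.pyGetD_eq_getElem _ 0 (by omega) (by simp; omega)]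
    rw [List.getElem_set]
    simp
  have hres := outerA_aux k mn n s t Hp (n - 2).toNat (1 + 1) c (0 + t (PySem.List.pyGetD s 1 0))
    (by omega) (by omega) hn hclen
    (by intro m hm2 hmn'
        exact hcget m (by omega) (by omega) (by omega))
  refine ⟨?_, ?_, hres.2.2⟩
  · rw [hres.2.1 0 (by omega) (by omega), hcget 0 (by omega) (by omega) (by omega)]
  · rw [hres.2.1 1 (by omega) (by omega), hcv]

theorem pyGetD_mono_of_pairwise (s : List Int) (hp : List.Pairwise (· ≤ ·) s)
    (i j : Int) (h0 : 0 ≤ i) (hij : i ≤ j) (hj : j < (s.length : Int)) :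
    PySem.List.pyGetD s i 0 ≤ PySem.List.pyGetD s j 0 := by
  rw [PySem.List.pyGetD_eq_getElem _ 0 h0 (by omega),
      PySem.List.pyGetD_eq_getElem _ 0 (by omega) hj]
  rcases eq_or_lt_of_le hij with h | h
  · subst h; exact le_refl _
  · rw [List.pairwise_iff_getElem] at hp
    exact hp i.toNat j.toNat (by omega) (by omega) (by omega)

theorem solve_equiv_main : ∀ (n : Int) (k : Int) (a : List Int),
    Pre_solve n k a → solve n k a = solve_alt n k a := by
  intro n k a hpre
  obtain ⟨hlen2, hnlen, hterm⟩ := hpre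
  unfold solve solve_alt
  dsimp only
  set s := PySem.List.sorted a (fun x => x) false with hs
  have hslen : s.length = a.length := PySem.List.length_sorted a (fun x => x) false
  by_cases h2n : n ≤ 1
  · rw [PySem.List.pyRange_one_eq_nil (by omega : n ≤ 1)]
    rw [if_neg (by omega : ¬ (2:Int) ≤ n)]
    simp only [List.foldl_nil, ite_self]
  · push Not at h2n
    by_cases hmn0 : 0 < PySem.List.pyGetD s 0 0
    · -- mn > 0 : closed-form pump
      have Hp : ∀ m : Int, 1 ≤ m → m < n → ∀ sp : Int,
          pumpA k (PySem.List.pyGetD s 0 0)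
              ((k - PySem.List.pyGetD s m 0).toNat + 1) (PySem.List.pyGetD s m 0) sp
            = (PySem.List.pyGetD s m 0 + PySem.List.pyGetD s 0 0 *
                 max 0 (PySem.Int.floordiv (k - PySem.List.pyGetD s m 0) (PySem.List.pyGetD s 0 0)),
               sp + max 0 (PySem.Int.floordiv (k - PySem.List.pyGetD s m 0) (PySem.List.pyGetD s 0 0))) := by
        intro m hm1 hm2 sp
        apply pump_closed k _ hmn0
        have h1 : (k - PySem.List.pyGetD s m 0)
            < ((k - PySem.List.pyGetD s m 0).toNat + 1 : Int) := by omega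
        have h2 : ((k - PySem.List.pyGetD s m 0).toNat + 1 : Int)
            ≤ PySem.List.pyGetD s 0 0 * ((k - PySem.List.pyGetD s m 0).toNat + 1 : Int) := by
          nlinarith [Int.natCast_nonneg ((k - PySem.List.pyGetD s m 0).toNat), hmn0]
        push_cast
        omega
      have hm := mainfold k (PySem.List.pyGetD s 0 0) n s
        (fun ai => max 0 (PySem.Int.floordiv (k - ai) (PySem.List.pyGetD s 0 0)))
        (by omega) (by omega) Hp
      have hfin1 := pump_final k (PySem.List.pyGetD s 0 0) (PySem.List.pyGetD s 1 0) hmn0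
      rw [if_neg (by
        rw [hm.1, hm.2.1]
        beta_reduce
        omega)]
      rw [if_pos hmn0, if_pos hmn0, if_pos (by omega : (2:Int) ≤ n)]
      rw [if_neg (by omega : ¬ (PySem.List.pyGetD s 0 0 + (PySem.List.pyGetD s 1 0
            + PySem.List.pyGetD s 0 0 * max 0 (PySem.Int.floordiv
                (k - PySem.List.pyGetD s 1 0) (PySem.List.pyGetD s 0 0))) ≤ k))]
      exact hm.2.2
    · -- mn ≤ 0 : no spell is ever cast
      have hks : k < PySem.List.pyGetD s 1 0 + PySem.List.pyGetD s 0 0 := by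
        rcases hterm with h | h
        · exact absurd ((allpos_iff a (by omega)).mp h) hmn0
        · by_contra hc
          exact h ⟨by omega, by rw [pairLE_iff k a hlen2, ← hs]; omega⟩
      have Hp : ∀ m : Int, 1 ≤ m → m < n → ∀ sp : Int,
          pumpA k (PySem.List.pyGetD s 0 0)
              ((k - PySem.List.pyGetD s m 0).toNat + 1) (PySem.List.pyGetD s m 0) sp
            = (PySem.List.pyGetD s m 0 + PySem.List.pyGetD s 0 0 * (fun _ : Int => (0:Int)) (PySem.List.pyGetD s m 0),
               sp + (fun _ : Int => (0:Int)) (PySem.List.pyGetD s m 0)) := by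
        intro m hm1 hm2 sp
        have hmono := pyGetD_mono_of_pairwise s
          (by rw [hs]; simpa using PySem.List.sorted_pairwise a (fun x => x))
          1 m (by omega) hm1 (by omega)
        rw [pump_stop _ _ _ _ _ (by omega)]
        simp
      have hm := mainfold k (PySem.List.pyGetD s 0 0) n s (fun _ => 0) (by omega) (by omega) Hp
      rw [if_neg (by rw [hm.1, hm.2.1]; beta_reduce; omega)]
      rw [if_neg hmn0, if_neg hmn0]
      rw [if_neg (by omega : ¬ (PySem.List.pyGetD s 0 0 + PySem.List.pyGetD s 1 0 ≤ k))]
      rw [hm.2.2]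
      simp only []
      exact foldl_add_zero (PySem.List.pyRange 1 n) 0

-- ===== VERDICT (by name: the statement is the Claim_ definition above) =====
theorem solve_spec : Claim_equal_solve := by
  intro n k a _ hpre
  exact solve_equiv_main n k a hpre
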